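-- pv_equiv track=rewrite | github.com/gong7788/UG4_project | correctingagent/util/CPD_generation.py | equals_CPD
-- ===== SOURCE A (Python) =====
-- def equals_CPD(seta, setb, carda=None, cardb=None):
--     if len(seta) != len(setb):
--         raise TypeError('Lengths do not match')
--     if carda is None:
--         carda = [2]*len(seta)
--     if cardb is None:
--         cardb = [2]*len(setb)
--     results = []
--     def helper(settingsa, cardsa, settingsb, cardsb, results):
--         if len(cardsa) == 0:
--             results.append(int(all([a == b for a,b in zip(settingsa, settingsb)])))
--         else:
--             for i in range(cardsa[0]):
--                 for j in range(cardsb[0]):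
--                     sa = settingsa.copy()
--                     sb = settingsb.copy()
--                     helper(sa+[i], cardsa[1:], sb+[j], cardsb[1:], results)
--     helper([], carda, [], cardb, results)
--
--     return results
-- ===== SOURCE B (Python) =====
-- def equals_CPD(seta, setb, carda=None, cardb=None):
--     if len(seta) != len(setb):
--         raise TypeError('Lengths do not match')
--     if carda is None:
--         carda = [2] * len(seta)
--     if cardb is None:
--         cardb = [2] * len(setb)
--     pairs = list(zip(carda, cardb))
--     if any(a <= 0 or b <= 0 for a, b in pairs):
--         return []          # some level has an empty range: no assignment is ever enumerated
--     res = [1]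
--     for a, b in reversed(pairs):
--         zeros = [0] * len(res)
--         res = [x for i in range(a) for j in range(b)
--                for x in (res if i == j else zeros)]
--     return res
-- ===== Notes on version B (the rewrite author's own statement) =====
-- stated objective: alternative
-- what changed: Replaces the nested recursive enumeration (which copies the growing settings lists and re-checks all positions at every leaf) by an empty-range early-out plus a single back-to-front fold over zip(carda,cardb) that builds each level's CPD block from the previous block and a zero block, so no settings lists exist at all; intended as faster (O(P) vs O(P*n)), but a timing run could not confirm a ratio (A already times out at sizes B still finishes).
-- outside the precondition, e.g. on equals_CPD([0], [0], [2, 0], [2]): A returns [], B returns [1, 0, 0, 1]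
import Mathlib
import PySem

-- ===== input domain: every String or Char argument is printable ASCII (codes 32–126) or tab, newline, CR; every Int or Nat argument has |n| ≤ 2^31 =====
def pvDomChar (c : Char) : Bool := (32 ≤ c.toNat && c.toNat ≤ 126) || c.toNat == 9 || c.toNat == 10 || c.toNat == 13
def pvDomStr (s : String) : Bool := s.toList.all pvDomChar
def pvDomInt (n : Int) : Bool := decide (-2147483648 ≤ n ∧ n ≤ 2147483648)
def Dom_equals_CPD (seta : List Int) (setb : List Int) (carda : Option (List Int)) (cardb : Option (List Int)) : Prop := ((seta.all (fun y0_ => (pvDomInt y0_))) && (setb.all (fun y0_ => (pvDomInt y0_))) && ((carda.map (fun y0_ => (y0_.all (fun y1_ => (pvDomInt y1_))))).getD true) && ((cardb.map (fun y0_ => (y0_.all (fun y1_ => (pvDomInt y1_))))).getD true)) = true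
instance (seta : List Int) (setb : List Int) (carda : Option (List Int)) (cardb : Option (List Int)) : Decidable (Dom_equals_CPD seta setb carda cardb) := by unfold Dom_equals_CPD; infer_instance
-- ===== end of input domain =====

-- B replaces A's recursive enumeration (with per-leaf list copies and equality re-checks) by one
-- back-to-front fold over zip(carda,cardb) building each CPD level from the previous block (objective: alternative; intended as faster, measured as unconfirmed).

-- ===== PORT A =====
-- the inner 'helper': recursion on cardsa; 'cardsb.headD 0' stands for Python's cardsb[0], which
-- inside Pre_ is only reached when cardsb is nonempty (empty cardsb there would raise IndexError)
def pvHelperA : List Int → List Int → List Int → List Int → List Int → List Int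
  | settingsa, [], settingsb, _cardsb, results =>
      results ++ [if ((settingsa.zip settingsb).all fun p => p.1 == p.2) then (1 : Int) else 0]
  | settingsa, ca0 :: cardsa, settingsb, cardsb, results =>
      (PySem.List.pyRange 0 ca0 1).foldl (fun results i =>
        (PySem.List.pyRange 0 (cardsb.headD 0) 1).foldl (fun results j =>
          pvHelperA (settingsa ++ [i]) cardsa (settingsb ++ [j]) cardsb.tail results) results) results

def equals_CPD (seta : List Int) (setb : List Int) (carda : Option (List Int)) (cardb : Option (List Int)) : List Int :=
  if seta.length ≠ setb.length then []   -- Python raises TypeError here (excluded by Pre_)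
  else
    let carda' := carda.getD (List.replicate seta.length 2)
    let cardb' := cardb.getD (List.replicate setb.length 2)
    pvHelperA [] carda' [] cardb' []

-- ===== PORT B =====
def equals_CPD_alt (seta : List Int) (setb : List Int) (carda : Option (List Int)) (cardb : Option (List Int)) : List Int :=
  if seta.length ≠ setb.length then []   -- Python raises TypeError here (excluded by Pre_)
  else
    let ca := carda.getD (List.replicate seta.length 2)
    let cb := cardb.getD (List.replicate setb.length 2)
    if (ca.zip cb).any (fun p => decide (p.1 ≤ 0) || decide (p.2 ≤ 0)) then []
    else ((ca.zip cb).reverse).foldl (fun res p =>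
      (PySem.List.pyRange 0 p.1 1).foldl (fun out i =>
        (PySem.List.pyRange 0 p.2 1).foldl (fun out j =>
          out ++ (if i == j then res else List.replicate res.length 0)) out) []) [1]

-- ===== PRECONDITION & SPEC =====
-- Pre_ excludes len(seta) ≠ len(setb), where A raises TypeError, and the corner len(carda) > len(cardb),
-- where A raises IndexError unless a nonpositive cardinality stops the recursion first — a mismatched-card
-- corner whose value (A: possibly empty, B: the zip-truncated table) no caller would specify.
def Pre_equals_CPD (seta : List Int) (setb : List Int) (carda : Option (List Int)) (cardb : Option (List Int)) : Prop :=
  seta.length = setb.length ∧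
  (carda.getD (List.replicate seta.length 2)).length ≤ (cardb.getD (List.replicate setb.length 2)).length
instance (seta : List Int) (setb : List Int) (carda : Option (List Int)) (cardb : Option (List Int)) : Decidable (Pre_equals_CPD seta setb carda cardb) := by unfold Pre_equals_CPD; infer_instance

def pvWitness_equals_CPD : List Int × List Int × Option (List Int) × Option (List Int) := ([1, 2], [1, 3], none, none)

def Spec_equals_CPD (seta : List Int) (setb : List Int) (carda : Option (List Int)) (cardb : Option (List Int)) (out : List Int) : Prop := out = equals_CPD_alt seta setb carda cardb
instance (seta : List Int) (setb : List Int) (carda : Option (List Int)) (cardb : Option (List Int)) (out : List Int) : Decidable (Spec_equals_CPD seta setb carda cardb out) := by unfold Spec_equals_CPD; infer_instance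

-- ===== CLAIM (what is proved, stated in full; the proofs are below) =====
def Claim_equal_equals_CPD : Prop := ∀ (seta : List Int) (setb : List Int) (carda : Option (List Int)) (cardb : Option (List Int)), Dom_equals_CPD seta setb carda cardb → Pre_equals_CPD seta setb carda cardb → Spec_equals_CPD seta setb carda cardb (equals_CPD seta setb carda cardb)

-- ===== LEMMAS AND PROOFS =====

-- B's one level, as a foldr step (what the reversed foldl of the port computes)
def pvStep (p : Int × Int) (res : List Int) : List Int :=
  (PySem.List.pyRange 0 p.1 1).foldl (fun out i =>
    (PySem.List.pyRange 0 p.2 1).foldl (fun out j =>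
      out ++ (if i == j then res else List.replicate res.length 0)) out) []

def pvG (l : List (Int × Int)) : List Int := l.foldr pvStep [1]

theorem pv_foldl_append_flat (l : List Int) (t : Int → List Int) :
    ∀ init : List Int, l.foldl (fun acc x => acc ++ t x) init = init ++ l.flatMap t := by
  induction l with
  | nil => intro init; simp
  | cons x xs ih => intro init; simp [List.foldl_cons, ih]

theorem pv_foldl2_append (l₁ l₂ : List Int) (t : Int → Int → List Int) (init : List Int) :
    l₁.foldl (fun acc i => l₂.foldl (fun acc j => acc ++ t i j) acc) init
      = init ++ l₁.flatMap (fun i => l₂.flatMap (t i)) := by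
  induction l₁ generalizing init with
  | nil => simp
  | cons x xs ih =>
      rw [List.foldl_cons, pv_foldl_append_flat l₂ (t x), ih]
      simp [List.flatMap, List.append_assoc]

theorem pvG_cons (p : Int × Int) (l : List (Int × Int)) :
    pvG (p :: l) = (PySem.List.pyRange 0 p.1 1).flatMap (fun i =>
      (PySem.List.pyRange 0 p.2 1).flatMap (fun j =>
        if i == j then pvG l else List.replicate (pvG l).length 0)) := by
  show pvStep p (pvG l) = _
  unfold pvStep
  rw [pv_foldl2_append]
  simp

theorem pvHelperA_eq (cardsa : List Int) :
    ∀ (cardsb sa sb res : List Int), sa.length = sb.length → cardsa.length ≤ cardsb.length →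
      pvHelperA sa cardsa sb cardsb res
        = res ++ (pvG (cardsa.zip cardsb)).map
            (fun x => if ((sa.zip sb).all fun p => p.1 == p.2) then x else 0) := by
  induction cardsa with
  | nil =>
      intro cardsb sa sb res _ _
      simp [pvHelperA, pvG]
  | cons a car ih =>
      intro cardsb sa sb res hlen hle
      match cardsb with
      | [] => simp at hle
      | b :: cbs =>
        have hle' : car.length ≤ cbs.length := by simpa using hle
        have hfun : ∀ (i j : Int) (res : List Int),
            pvHelperA (sa ++ [i]) car (sb ++ [j]) cbs res
              = res ++ (pvG (car.zip cbs)).map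
                  (fun x => if (((sa.zip sb).all fun p => p.1 == p.2) && (i == j)) then x else 0) := by
          intro i j res
          rw [ih cbs (sa ++ [i]) (sb ++ [j]) res (by simp [hlen]) hle']
          have hz : (sa ++ [i]).zip (sb ++ [j]) = sa.zip sb ++ [(i, j)] :=
            List.zip_append hlen
          have hall : (((sa ++ [i]).zip (sb ++ [j])).all fun p => p.1 == p.2)
              = (((sa.zip sb).all fun p => p.1 == p.2) && (i == j)) := by
            rw [hz]; simp
          rw [hall]
        show (PySem.List.pyRange 0 a 1).foldl (fun results i =>
            (PySem.List.pyRange 0 ((b :: cbs).headD 0) 1).foldl (fun results j =>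
              pvHelperA (sa ++ [i]) car (sb ++ [j]) (b :: cbs).tail results) results) res = _
        simp only [List.headD_cons, List.tail_cons, hfun]
        rw [pv_foldl2_append]
        rw [List.zip_cons_cons, pvG_cons]
        congr 1
        rw [List.map_flatMap]
        congr 1
        funext i
        rw [List.map_flatMap]
        congr 1
        funext j
        by_cases h : i = j
        · subst h
          have hb : (i == i) = true := by simp
          rw [hb]
          simp
          intro x _
          rw [Bool.and_true]
        · have hb : (i == j) = false := by simp [h]
          simp [hb, List.map_replicate, List.map_const']

-- if some level's range is empty, no leaf is ever appended: the whole table is []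
theorem pvG_eq_nil (l : List (Int × Int))
    (h : l.any (fun p => decide (p.1 ≤ 0) || decide (p.2 ≤ 0)) = true) : pvG l = [] := by
  induction l with
  | nil => simp at h
  | cons p t ih =>
      rw [pvG_cons]
      rcases List.any_eq_true.mp h with ⟨q, hq, hq2⟩
      rcases List.mem_cons.mp hq with rfl | hqt
      · rcases Bool.or_eq_true_iff.mp hq2 with h1 | h1
        · have : PySem.List.pyRange 0 q.1 1 = [] :=
            PySem.List.pyRange_one_eq_nil (by exact_mod_cast of_decide_eq_true h1)
          simp [this]
        · have : PySem.List.pyRange 0 q.2 1 = [] :=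
            PySem.List.pyRange_one_eq_nil (by exact_mod_cast of_decide_eq_true h1)
          simp [this]
      · have ht : pvG t = [] := ih (List.any_eq_true.mpr ⟨q, hqt, hq2⟩)
        simp [ht]

theorem pvAlt_eq (seta setb : List Int) (carda cardb : Option (List Int))
    (h : seta.length = setb.length) :
    equals_CPD_alt seta setb carda cardb
      = pvG ((carda.getD (List.replicate seta.length 2)).zip
             (cardb.getD (List.replicate setb.length 2))) := by
  unfold equals_CPD_alt
  rw [if_neg (by simp [h])]
  by_cases hz : ((carda.getD (List.replicate seta.length 2)).zip
      (cardb.getD (List.replicate setb.length 2))).any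
        (fun p => decide (p.1 ≤ 0) || decide (p.2 ≤ 0)) = true
  · rw [if_pos hz, pvG_eq_nil _ hz]
  · rw [if_neg hz, List.foldl_reverse]
    rfl

-- ===== VERDICT (by name: the statement is the Claim_ definition above) =====
theorem equals_CPD_spec : Claim_equal_equals_CPD := by
  intro seta setb carda cardb _hdom hpre
  obtain ⟨hlen, hle⟩ := hpre
  unfold Spec_equals_CPD
  rw [pvAlt_eq seta setb carda cardb hlen]
  unfold equals_CPD
  rw [if_neg (by simp [hlen])]
  rw [pvHelperA_eq _ _ [] [] [] rfl hle]
  simp
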